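-- pv_equiv track=rewrite | github.com/wesbdss/AIDA-Core-Main | src/1-preprocess/method1/preprocess.py | bagwords
-- ===== SOURCE A (Python) =====
-- def bagwords(labels,docs_x,docs_y,words):
--     training = []
--     output = []
--
--     out_vazio = [0 for _ in range(len(labels))]
--
--     for x, doc in enumerate(docs_x):
--         bag= []
--
--         plv = [w.lower() for w in doc]
--
--         for w in words:
--             if w in plv:
--                 bag.append(1)
--             else:
--                 bag.append(0)
--
--         output_row = out_vazio[:]
--         output_row[labels.index(docs_y[x])] =1
--
--         training.append(bag)
--         output.append(output_row)
--
--     return training, output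
-- ===== SOURCE B (Python) =====
-- def bagwords(labels, docs_x, docs_y, words):
--     # Inverted index: each vocabulary word (raw case) -> all its positions,
--     # so a document is scanned once instead of scanning the vocabulary per document.
--     index = {}
--     for i, w in enumerate(words):
--         index.setdefault(w, []).append(i)
--
--     n = len(words)
--     training = []
--     output = []
--     for doc, y in zip(docs_x, docs_y):
--         bag = [0] * n
--         for dw in set(w.lower() for w in doc):
--             for p in index.get(dw, []):
--                 bag[p] = 1
--         row = [0] * len(labels)
--         row[labels.index(y)] = 1
--         training.append(bag)
--         output.append(row)
--     return training, output
-- ===== Notes on version B (the rewrite author's own statement) =====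
-- stated objective: alternative
-- what changed: Replaces the per-document scan of the whole vocabulary with membership tests against the lowercased document by a precomputed inverted index (vocabulary word -> list of positions, duplicates preserved) plus a single pass over each document's distinct lowercased words that writes 1s into a preallocated bag.
import Mathlib
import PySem

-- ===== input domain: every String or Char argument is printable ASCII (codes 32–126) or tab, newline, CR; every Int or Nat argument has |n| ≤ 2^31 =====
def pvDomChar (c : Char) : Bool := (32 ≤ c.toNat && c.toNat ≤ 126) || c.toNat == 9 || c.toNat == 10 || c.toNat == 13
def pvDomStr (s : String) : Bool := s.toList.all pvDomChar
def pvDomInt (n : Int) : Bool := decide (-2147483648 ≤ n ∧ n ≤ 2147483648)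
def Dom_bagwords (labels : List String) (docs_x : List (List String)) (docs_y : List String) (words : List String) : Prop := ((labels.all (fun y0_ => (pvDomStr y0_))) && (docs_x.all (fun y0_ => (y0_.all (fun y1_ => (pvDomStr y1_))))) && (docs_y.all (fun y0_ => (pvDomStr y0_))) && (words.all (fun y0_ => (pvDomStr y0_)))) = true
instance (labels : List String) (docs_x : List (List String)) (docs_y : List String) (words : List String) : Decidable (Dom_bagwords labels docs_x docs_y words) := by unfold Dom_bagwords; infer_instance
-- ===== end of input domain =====

-- B replaces the per-document scan of the whole vocabulary by a precomputed
-- inverted index (word -> positions) and a single pass over each document's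
-- distinct lowercased words (objective: alternative decomposition).

-- ===== PORT A =====
def bagwords (labels : List String) (docs_x : List (List String)) (docs_y : List String) (words : List String) : List (List Int) × List (List Int) :=
  let out_vazio : List Int := (List.range labels.length).map (fun _ => (0 : Int))
  let st :=
    (PySem.List.enumerate docs_x 0).foldl
      (fun (st : List (List Int) × List (List Int)) p =>
        let plv := p.2.map PySem.Str.lower
        let bag := words.foldl
          (fun (b : List Int) w => if w ∈ plv then b ++ [(1 : Int)] else b ++ [(0 : Int)]) []
        -- docs_y[x]: IndexError excluded by Pre_; labels.index: ValueError excluded by Pre_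
        let y := PySem.List.pyGetD docs_y p.1 ""
        let output_row :=
          PySem.List.pySetD out_vazio (((PySem.List.index? labels y).getD 0 : Nat) : Int) 1
        (st.1 ++ [bag], st.2 ++ [output_row]))
      ([], [])
  st

-- ===== PORT B =====
def bagwordsIndex (words : List String) : PySem.Dict String (List Int) :=
  (PySem.List.enumerate words 0).foldl
    (fun d p => d.modify p.2 [] (fun l => l ++ [p.1])) PySem.Dict.empty

def bagwords_alt (labels : List String) (docs_x : List (List String)) (docs_y : List String) (words : List String) : List (List Int) × List (List Int) :=
  let index := bagwordsIndex words
  let n := words.length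
  (docs_x.zip docs_y).foldl
    (fun (st : List (List Int) × List (List Int)) p =>
      let bag0 : List Int := List.replicate n 0
      let dws : PySem.Set String := PySem.Set.ofList (p.1.map PySem.Str.lower)
      let bag := dws.foldl
        (fun b dw => (index.getD dw []).foldl (fun b2 q => PySem.List.pySetD b2 q 1) b) bag0
      let row := PySem.List.pySetD (List.replicate labels.length (0 : Int))
                   (((PySem.List.index? labels p.2).getD 0 : Nat) : Int) 1
      (st.1 ++ [bag], st.2 ++ [row]))
    ([], [])

-- ===== PRECONDITION & SPEC =====
-- Pre_ excludes exactly the inputs where A raises: docs_y shorter than docs_x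
-- (IndexError on docs_y[x]) or some used docs_y entry missing from labels (ValueError).
def Pre_bagwords (labels : List String) (docs_x : List (List String)) (docs_y : List String) (words : List String) : Prop :=
  docs_x.length ≤ docs_y.length ∧ ∀ y ∈ docs_y.take docs_x.length, y ∈ labels

instance (labels : List String) (docs_x : List (List String)) (docs_y : List String) (words : List String) : Decidable (Pre_bagwords labels docs_x docs_y words) := by unfold Pre_bagwords; infer_instance

def pvWitness_bagwords : List String × List (List String) × List String × List String :=
  (["pos", "neg"], [["The", "cat"], ["dog"]], ["neg", "pos"], ["cat", "dog", "cat", "bird"])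

def Spec_bagwords (labels : List String) (docs_x : List (List String)) (docs_y : List String) (words : List String) (out : List (List Int) × List (List Int)) : Prop := out = bagwords_alt labels docs_x docs_y words
instance (labels : List String) (docs_x : List (List String)) (docs_y : List String) (words : List String) (out : List (List Int) × List (List Int)) : Decidable (Spec_bagwords labels docs_x docs_y words out) := by unfold Spec_bagwords; infer_instance

-- ===== CLAIM (what is proved, stated in full; the proofs are below) =====
def Claim_equal_bagwords : Prop := ∀ (labels : List String) (docs_x : List (List String)) (docs_y : List String) (words : List String), Dom_bagwords labels docs_x docs_y words → Pre_bagwords labels docs_x docs_y words → Spec_bagwords labels docs_x docs_y words (bagwords labels docs_x docs_y words)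

-- ===== LEMMAS AND PROOFS =====

-- A fold that appends one element to each component is a pair of maps.
theorem foldl_pair_append {α β γ : Type} (f : α → β) (g : α → γ) :
    ∀ (l : List α) (a : List β) (b : List γ),
      l.foldl (fun (st : List β × List γ) p => (st.1 ++ [f p], st.2 ++ [g p])) (a, b)
        = (a ++ l.map f, b ++ l.map g) := by
  intro l
  induction l with
  | nil => simp
  | cons x xs ih => intro a b; simp [List.foldl_cons, ih]

-- The inverted index lists exactly the positions of each vocabulary word.
theorem getD_bagwordsIndex (words : List String) (dw : String) :
    (bagwordsIndex words).getD dw []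
      = ((PySem.List.enumerate words 0).filter (fun p => p.2 == dw)).map (·.1) := by
  have h : bagwordsIndex words
      = ((PySem.List.enumerate words 0).map Prod.swap).foldl
          (fun d p => d.modify p.1 [] (fun l => l ++ [p.2])) PySem.Dict.empty := by
    rw [List.foldl_map]
    rfl
  rw [h, PySem.Dict.getD_foldl_modify_append]
  simp [List.filter_map, Function.comp_def]

theorem mem_getD_bagwordsIndex (words : List String) (dw : String) (i : Int) :
    i ∈ (bagwordsIndex words).getD dw []
      ↔ ∃ (k : Nat) (hk : k < words.length), words[k] = dw ∧ i = (k : Int) := by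
  rw [getD_bagwordsIndex]
  simp only [List.mem_map, List.mem_filter, PySem.List.mem_enumerate_iff]
  constructor
  · rintro ⟨p, ⟨⟨k, hk, rfl⟩, hdw⟩, rfl⟩
    exact ⟨k, hk, by simpa using hdw, by simp⟩
  · rintro ⟨k, hk, hw, rfl⟩
    exact ⟨((k : Int), words[k]), ⟨⟨k, hk, by simp⟩, by simpa using hw⟩, rfl⟩

-- Folding pySetD _ _ 1 over nonnegative positions: length kept, listed cells become 1.
theorem foldl_pySetD_getElem? (ps : List Int) (hps : ∀ q ∈ ps, 0 ≤ q) :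
    ∀ (b : List Int) (i : Nat),
      (ps.foldl (fun b2 q => PySem.List.pySetD b2 q 1) b)[i]?
        = if (i : Int) ∈ ps ∧ i < b.length then some 1 else b[i]? := by
  induction ps with
  | nil => intro b i; simp
  | cons q ps ih =>
    intro b i
    have hq : 0 ≤ q := hps q (by simp)
    have hps' : ∀ r ∈ ps, 0 ≤ r := fun r hr => hps r (by simp [hr])
    rw [List.foldl_cons, ih hps', PySem.List.pySetD_of_nonneg b 1 hq]
    by_cases h1 : (i : Int) ∈ ps ∧ i < b.length
    · simp [h1.1, h1.2, List.mem_cons]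
    · simp only [List.length_set]
      rw [if_neg h1, List.getElem?_set]
      by_cases h2 : i = q.toNat ∧ i < b.length
      · have hiq : (i : Int) = q := by omega
        rw [if_pos h2.1.symm, if_pos (by omega : q.toNat < b.length),
            if_pos ⟨by simp [hiq], h2.2⟩]
      · have hne : ¬ ((i:Int) ∈ q :: ps ∧ i < b.length) := by
          rintro ⟨hm, hlt⟩
          rcases List.mem_cons.mp hm with h | h
          · exact h2 ⟨by omega, hlt⟩
          · exact h1 ⟨h, hlt⟩
        rw [if_neg hne]
        by_cases h3 : q.toNat = i
        · have hni : ¬ i < b.length := by rw [← h3]; intro h; exact h2 ⟨h3.symm, h3 ▸ h⟩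
          rw [if_pos h3, if_neg (by omega : ¬ q.toNat < b.length)]
          exact (List.getElem?_eq_none (by omega)).symm
        · rw [if_neg h3]

-- Per-document bag equality: vocabulary scan with membership test = inverted-index writes.
theorem bag_eq (words : List String) (doc : List String) :
    words.foldl
        (fun (b : List Int) w => if w ∈ doc.map PySem.Str.lower then b ++ [(1 : Int)] else b ++ [(0 : Int)]) []
      = (PySem.Set.ofList (doc.map PySem.Str.lower)).foldl
          (fun b dw => ((bagwordsIndex words).getD dw []).foldl (fun b2 q => PySem.List.pySetD b2 q 1) b)
          (List.replicate words.length 0) := by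
  set plv := doc.map PySem.Str.lower with hplv
  have hA : words.foldl
      (fun (b : List Int) w => if w ∈ plv then b ++ [(1 : Int)] else b ++ [(0 : Int)]) []
      = words.map (fun w => if w ∈ plv then (1 : Int) else 0) := by
    have hfun : (fun (b : List Int) w => if w ∈ plv then b ++ [(1 : Int)] else b ++ [(0 : Int)])
        = fun (b : List Int) w => b ++ [if w ∈ plv then (1 : Int) else 0] := by
      funext b w; split <;> rfl
    rw [hfun, PySem.List.foldl_append_singleton_eq_map]
    rfl
  set S := PySem.Set.ofList plv with hS
  set ps := S.flatMap (fun dw => (bagwordsIndex words).getD dw []) with hps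
  have hnn : ∀ q ∈ ps, 0 ≤ q := by
    intro q hq
    rw [hps, List.mem_flatMap] at hq
    obtain ⟨dw, _, hq⟩ := hq
    obtain ⟨k, hk, _, rfl⟩ := (mem_getD_bagwordsIndex words dw q).mp hq
    exact Int.natCast_nonneg k
  rw [hA]
  rw [← List.foldl_flatMap]
  apply List.ext_getElem?
  intro i
  rw [foldl_pySetD_getElem? ps hnn]
  have hmem : ((i : Int) ∈ ps ∧ i < words.length) ↔ (i < words.length ∧ words.getD i "" ∈ plv) := by
    constructor
    · rintro ⟨hm, hlt⟩
      refine ⟨hlt, ?_⟩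
      rw [hps, List.mem_flatMap] at hm
      obtain ⟨dw, hdw, hq⟩ := hm
      obtain ⟨k, hk, hwk, hik⟩ := (mem_getD_bagwordsIndex words dw (i : Int)).mp hq
      have : k = i := by omega
      subst this
      rw [List.getD_eq_getElem _ _ hlt]
      rw [hwk]
      exact (PySem.Set.mem_ofList plv dw).mp hdw
    · rintro ⟨hlt, hm⟩
      refine ⟨?_, hlt⟩
      rw [hps, List.mem_flatMap]
      refine ⟨words.getD i "", (PySem.Set.mem_ofList plv _).mpr hm, ?_⟩
      exact (mem_getD_bagwordsIndex words _ (i : Int)).mpr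
        ⟨i, hlt, (List.getD_eq_getElem _ _ hlt).symm, rfl⟩
  by_cases hlt : i < words.length
  · rw [List.getElem?_map, List.getElem?_eq_getElem hlt]
    by_cases hm : words.getD i "" ∈ plv
    · rw [if_pos (by simp [List.length_replicate]; exact hmem.mpr ⟨hlt, hm⟩)]
      simp only [Option.map_some]
      rw [List.getD_eq_getElem _ _ hlt] at hm
      simp [hm]
    · rw [if_neg (by simp only [List.length_replicate]; intro h; exact hm (hmem.mp h).2)]
      rw [List.getD_eq_getElem _ _ hlt] at hm
      simp [hm, hlt]
  · rw [if_neg (by simp only [List.length_replicate]; intro h; exact hlt h.2)]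
    simp [hlt]

-- ===== VERDICT (by name: the statement is the Claim_ definition above) =====
theorem bagwords_spec : Claim_equal_bagwords := by
  intro labels docs_x docs_y words _ hpre
  obtain ⟨hlen, _⟩ := hpre
  unfold Spec_bagwords
  have e1 : bagwords labels docs_x docs_y words
      = ((PySem.List.enumerate docs_x 0).map (fun p : Int × List String =>
            words.foldl (fun (b : List Int) w =>
              if w ∈ p.2.map PySem.Str.lower then b ++ [(1 : Int)] else b ++ [(0 : Int)]) []),
         (PySem.List.enumerate docs_x 0).map (fun p : Int × List String =>
            PySem.List.pySetD ((List.range labels.length).map (fun _ => (0 : Int)))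
              (((PySem.List.index? labels (PySem.List.pyGetD docs_y p.1 "")).getD 0 : Nat) : Int) 1)) := by
    show (PySem.List.enumerate docs_x 0).foldl _ ([], []) = _
    rw [foldl_pair_append]
    rfl
  have e2 : bagwords_alt labels docs_x docs_y words
      = ((docs_x.zip docs_y).map (fun p : List String × String =>
            (PySem.Set.ofList (p.1.map PySem.Str.lower)).foldl
              (fun b dw => ((bagwordsIndex words).getD dw []).foldl
                (fun b2 q => PySem.List.pySetD b2 q 1) b)
              (List.replicate words.length 0)),
         (docs_x.zip docs_y).map (fun p : List String × String =>
            PySem.List.pySetD (List.replicate labels.length (0 : Int))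
              (((PySem.List.index? labels p.2).getD 0 : Nat) : Int) 1)) := by
    show (docs_x.zip docs_y).foldl _ ([], []) = _
    rw [foldl_pair_append]
    rfl
  rw [e1, e2]
  have hzlen : (docs_x.zip docs_y).length = docs_x.length := by
    rw [List.length_zip]; omega
  refine Prod.ext ?_ ?_
  · apply List.ext_getElem
    · simp [PySem.List.length_enumerate, hzlen]
    · intro i h1 h2
      simp only [List.getElem_map]
      rw [PySem.List.getElem_enumerate, List.getElem_zip]
      have hix : i < docs_x.length := by
        simpa [PySem.List.length_enumerate] using h1
      exact bag_eq words (docs_x[i]'hix)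
  · apply List.ext_getElem
    · simp [PySem.List.length_enumerate, hzlen]
    · intro i h1 h2
      have hix : i < docs_x.length := by
        simpa [PySem.List.length_enumerate] using h1
      have hiy : i < docs_y.length := by omega
      simp only [List.getElem_map]
      rw [PySem.List.getElem_enumerate, List.getElem_zip]
      have hy : PySem.List.pyGetD docs_y ((0 : Int) + (i : Nat)) "" = docs_y[i] := by
        rw [zero_add, PySem.List.pyGetD_natCast, List.getD_eq_getElem _ _ hiy]
      rw [hy]
      have hzero : (List.range labels.length).map (fun _ => (0 : Int))
          = List.replicate labels.length (0 : Int) := by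
        simp [List.map_const']
      rw [hzero]
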